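-- pv_equiv track=rewrite | github.com/Caerii/assemblies | src/assembly_calculus/emergent/_parser_core.py | _detect_passive
-- ===== SOURCE A (Python) =====
-- from typing import Dict, List, Optional, Set, Tuple
--
-- def _detect_passive(words: List[str],
--                     categories: Dict[str, str]) -> bool:
--     """Detect passive voice: 'was/were' before the main verb."""
--     for i, word in enumerate(words):
--         if word in ("was", "were"):
--             # Check if next content word is a verb
--             for j in range(i + 1, len(words)):
--                 if categories.get(words[j]) == "VERB":
--                     return True
--                 if categories.get(words[j]) in ("NOUN", "PRON"):
--                     break
--     return False
-- ===== SOURCE B (Python) =====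
-- def _detect_passive(words, categories):
--     """Single reverse pass: track whether the next content word going forward is a verb."""
--     found = False
--     next_verb = False
--     for w in reversed(words):
--         if w in ("was", "were") and next_verb:
--             found = True
--         c = categories.get(w)
--         if c == "VERB":
--             next_verb = True
--         elif c in ("NOUN", "PRON"):
--             next_verb = False
--     return found
-- ===== Notes on version B (the rewrite author's own statement) =====
-- stated objective: alternative
-- what changed: Replaces A's nested scan (forward rescan after every 'was'/'were') by one reverse pass that maintains a 'next content word is a verb' flag, so each word is inspected once; it trades A's quadratic worst-case rescans for one lookup per word.
import Mathlib
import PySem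

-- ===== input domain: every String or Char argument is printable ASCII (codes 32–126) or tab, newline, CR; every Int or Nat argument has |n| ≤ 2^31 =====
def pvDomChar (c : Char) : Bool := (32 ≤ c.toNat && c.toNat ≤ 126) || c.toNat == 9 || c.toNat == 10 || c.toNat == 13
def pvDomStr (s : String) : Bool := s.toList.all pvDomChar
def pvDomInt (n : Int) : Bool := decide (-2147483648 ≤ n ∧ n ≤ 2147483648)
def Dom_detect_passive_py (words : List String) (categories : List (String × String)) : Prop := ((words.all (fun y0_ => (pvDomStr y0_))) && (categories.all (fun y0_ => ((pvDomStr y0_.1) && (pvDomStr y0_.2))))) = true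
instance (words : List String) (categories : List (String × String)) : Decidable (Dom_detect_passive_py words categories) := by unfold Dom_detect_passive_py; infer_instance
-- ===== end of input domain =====

-- B replaces A's nested forward rescans by one reverse pass with a next-content-word-is-a-verb flag (objective: alternative single-pass algorithm).
-- ===== PORT A =====
-- inner loop of A: scan forward from position i+1; VERB -> return True, NOUN/PRON -> break
def pvInnerA (categories : List (String × String)) : List String → Bool
  | [] => false
  | w :: ws =>
    if (PySem.Dict.mk categories).get? w == some "VERB" then true
    else if (PySem.Dict.mk categories).get? w == some "NOUN" ||
            (PySem.Dict.mk categories).get? w == some "PRON" then false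
    else pvInnerA categories ws

-- outer loop of A over enumerate(words): at each 'was'/'were' run the inner scan on the suffix
def pvOuterA (categories : List (String × String)) : List String → Bool
  | [] => false
  | w :: ws =>
    if w == "was" || w == "were" then
      (if pvInnerA categories ws then true else pvOuterA categories ws)
    else pvOuterA categories ws

def detect_passive_py (words : List String) (categories : List (String × String)) : Bool :=
  pvOuterA categories words

-- ===== PORT B =====
-- one step of B's reverse loop; state = (found, next_verb)
def pvStepB (categories : List (String × String)) (st : Bool × Bool) (w : String) : Bool × Bool :=
  let found := if (w == "was" || w == "were") && st.2 then true else st.1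
  let c := (PySem.Dict.mk categories).get? w
  let nv := if c == some "VERB" then true
            else if c == some "NOUN" || c == some "PRON" then false
            else st.2
  (found, nv)

def detect_passive_py_alt (words : List String) (categories : List (String × String)) : Bool :=
  (words.reverse.foldl (pvStepB categories) (false, false)).1

-- ===== PRECONDITION & SPEC =====
def Spec_detect_passive_py (words : List String) (categories : List (String × String)) (out : Bool) : Prop := out = detect_passive_py_alt words categories
instance (words : List String) (categories : List (String × String)) (out : Bool) : Decidable (Spec_detect_passive_py words categories out) := by unfold Spec_detect_passive_py; infer_instance

-- ===== CLAIM (what is proved, stated in full; the proofs are below) =====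
def Claim_equal_detect_passive_py : Prop := ∀ (words : List String) (categories : List (String × String)), Dom_detect_passive_py words categories → Spec_detect_passive_py words categories (detect_passive_py words categories)

-- ===== LEMMAS AND PROOFS =====
-- Invariant of B's reverse pass: the state after processing a suffix is exactly
-- (A's answer on that suffix, A's inner-scan verdict on that suffix).
theorem pvFoldInv (categories : List (String × String)) (ws : List String) :
    ws.foldr (fun w st => pvStepB categories st w) (false, false) =
      (pvOuterA categories ws, pvInnerA categories ws) := by
  induction ws with
  | nil => rfl
  | cons w ws ih =>
    rw [List.foldr_cons, ih]
    simp only [pvStepB, pvOuterA, pvInnerA]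
    refine Prod.ext ?_ rfl
    by_cases h : (w == "was" || w == "were") = true <;>
      simp [h] <;> cases pvInnerA categories ws <;> simp

-- ===== VERDICT (by name: the statement is the Claim_ definition above) =====
theorem detect_passive_py_spec : Claim_equal_detect_passive_py := by
  intro words categories _
  unfold Spec_detect_passive_py detect_passive_py detect_passive_py_alt
  rw [List.foldl_reverse, pvFoldInv]
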